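-- pv_equiv track=rewrite | github.com/Masakazoo/us-amex-offer-hunter | src/us_amex_offer_hunter/core/engine.py | _find_string_end
-- ===== SOURCE A (Python) =====
-- from typing import Any, Iterator, List, Optional
--
-- def _find_string_end(text: str, start_idx: int) -> Optional[int]:
--     """Find the end quote index of a JSON string literal starting at `start_idx`."""
--     if start_idx >= len(text) or text[start_idx] != '"':
--         return None
--     escaped = False
--     for i in range(start_idx + 1, len(text)):
--         ch = text[i]
--         if escaped:
--             escaped = False
--             continue
--         if ch == "\\":
--             escaped = True
--             continue
--         if ch == '"':
--             return i
--     return None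
-- ===== SOURCE B (Python) =====
-- def _find_string_end(text, start_idx):
--     """Find the end quote index of a JSON string literal starting at `start_idx`."""
--     if start_idx >= len(text) or text[start_idx] != '"':
--         return None
--     pos = start_idx + 1
--     while True:
--         q = text.find('"', pos)
--         if q == -1:
--             return None
--         bs = 0
--         j = q - 1
--         while j >= 0 and text[j] == '\\':
--             bs += 1
--             j -= 1
--         if bs % 2 == 0:
--             return q
--         pos = q + 1
-- ===== Notes on version B (the rewrite author's own statement) =====
-- stated objective: idiomatic
-- what changed: B replaces A's char-by-char scan with an escaped flag by repeated str.find jumps to the next quote followed by a backward count of the preceding backslash run (even run = unescaped).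
-- outside the precondition, e.g. on _find_string_end('ab"c"', -3): A returns -1, B returns 4
import Mathlib
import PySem

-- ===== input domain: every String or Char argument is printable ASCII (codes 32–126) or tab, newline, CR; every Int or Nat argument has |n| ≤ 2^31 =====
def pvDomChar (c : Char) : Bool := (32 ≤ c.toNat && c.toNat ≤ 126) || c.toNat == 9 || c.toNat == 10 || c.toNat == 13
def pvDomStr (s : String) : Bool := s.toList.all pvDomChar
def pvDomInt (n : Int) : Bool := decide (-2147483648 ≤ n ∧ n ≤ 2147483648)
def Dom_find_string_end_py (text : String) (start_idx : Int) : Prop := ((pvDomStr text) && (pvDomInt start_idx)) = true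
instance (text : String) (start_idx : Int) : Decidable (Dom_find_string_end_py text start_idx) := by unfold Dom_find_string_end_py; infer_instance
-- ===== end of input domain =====

-- B finds each candidate quote with str.find and checks the parity of the preceding backslash run,
-- instead of A's char-by-char scan carrying an `escaped` flag (idiomatic rewrite, same O(n) cost).


-- ===== PORT A =====
-- A's scan: for i in range(start_idx+1, len(text)) with the `escaped` flag, in the same branch order.
def findStringEndALoop (cs : List Char) (pos : Nat) (escaped : Bool) : Option Int :=
  if h : pos < cs.length then
    let ch := cs[pos]
    if escaped then findStringEndALoop cs (pos + 1) false
    else if ch = '\\' then findStringEndALoop cs (pos + 1) true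
    else if ch = '"' then some (pos : Int)
    else findStringEndALoop cs (pos + 1) false
  else none
termination_by cs.length - pos

def find_string_end_py (text : String) (start_idx : Int) : Option Int :=
  let cs := text.toList
  if start_idx ≥ (cs.length : Int) ∨ PySem.List.pyGet? cs start_idx ≠ some '"' then none
  else findStringEndALoop cs (start_idx + 1).toNat false

-- ===== PORT B =====
-- Source B's backward while loop counting the consecutive backslashes just below index j.
def findStringEndBsCount (cs : List Char) : Nat → Nat
  | 0 => 0
  | j + 1 => if cs.getD j ' ' = '\\' then findStringEndBsCount cs j + 1 else 0

-- Source B's outer while True loop: jump with text.find('"', pos); fuel only makes it total.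
def findStringEndBLoop (cs : List Char) : Nat → Nat → Option Int
  | 0, _ => none
  | fuel + 1, pos =>
    let q := PySem.Chars.findFrom cs ['"'] (pos : Int) none
    if q = -1 then none
    else if findStringEndBsCount cs q.toNat % 2 = 0 then some q
    else findStringEndBLoop cs fuel (q.toNat + 1)

def find_string_end_py_alt (text : String) (start_idx : Int) : Option Int :=
  let cs := text.toList
  if start_idx ≥ (cs.length : Int) ∨ PySem.List.pyGet? cs start_idx ≠ some '"' then none
  else findStringEndBLoop cs (cs.length + 1) (start_idx + 1).toNat

-- ===== PRECONDITION & SPEC =====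
-- Pre_ excludes negative start_idx: there A raises IndexError when start_idx < -len(text), and for
-- -len ≤ start_idx < 0 A's negative-index wraparound returns accidental negative indices that are
-- artefacts of A's implementation, not end positions of the string literal.
def Pre_find_string_end_py (text : String) (start_idx : Int) : Prop := 0 ≤ start_idx
instance (text : String) (start_idx : Int) : Decidable (Pre_find_string_end_py text start_idx) := by unfold Pre_find_string_end_py; infer_instance
def pvWitness_find_string_end_py : String × Int := ("\"ab\\\"c\"", 0)

def Spec_find_string_end_py (text : String) (start_idx : Int) (out : Option Int) : Prop := out = find_string_end_py_alt text start_idx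
instance (text : String) (start_idx : Int) (out : Option Int) : Decidable (Spec_find_string_end_py text start_idx out) := by unfold Spec_find_string_end_py; infer_instance

-- ===== CLAIM (what is proved, stated in full; the proofs are below) =====
def Claim_equal_find_string_end_py : Prop := ∀ (text : String) (start_idx : Int), Dom_find_string_end_py text start_idx → Pre_find_string_end_py text start_idx → Spec_find_string_end_py text start_idx (find_string_end_py text start_idx)

-- ===== LEMMAS AND PROOFS =====

-- The common recurrence both loops satisfy: first index i ≥ pos with cs[i] = '"' preceded by an
-- even run of backslashes.
def findStringEndG (cs : List Char) (pos : Nat) : Option Int :=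
  if h : pos < cs.length then
    if cs[pos] = '"' ∧ findStringEndBsCount cs pos % 2 = 0 then some (pos : Int)
    else findStringEndG cs (pos + 1)
  else none
termination_by cs.length - pos

lemma aLoop_eq_g (cs : List Char) (pos : Nat) (e : Bool)
    (he : e = decide (findStringEndBsCount cs pos % 2 = 1)) :
    findStringEndALoop cs pos e = findStringEndG cs pos := by
  rw [findStringEndALoop, findStringEndG]
  by_cases h : pos < cs.length
  · simp only [dif_pos h]
    have hrun : findStringEndBsCount cs (pos + 1)
        = if cs[pos] = '\\' then findStringEndBsCount cs pos + 1 else 0 := by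
      simp [findStringEndBsCount, List.getElem?_eq_getElem h]
    by_cases hodd : findStringEndBsCount cs pos % 2 = 1
    · -- escaped = true: A skips this char; the quote (if any) is escaped, run parity becomes even
      have he' : e = true := by simp [he, hodd]
      subst he'
      rw [if_pos rfl, if_neg (by rintro ⟨-, h0⟩; omega)]
      refine aLoop_eq_g cs (pos + 1) false ?_
      rw [hrun]; by_cases hb : cs[pos] = '\\'
      · rw [if_pos hb]; refine (decide_eq_false ?_).symm; omega
      · rw [if_neg hb]; simp
    · have he' : e = false := by simp [he, hodd]
      subst he'
      rw [if_neg (by simp)]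
      by_cases hb : cs[pos] = '\\'
      · rw [if_pos hb, if_neg (by rw [hb]; simp)]
        refine aLoop_eq_g cs (pos + 1) true ?_
        rw [hrun, if_pos hb]; refine (decide_eq_true ?_).symm; omega
      · rw [if_neg hb]
        by_cases hq : cs[pos] = '"'
        · rw [if_pos hq, if_pos ⟨hq, by omega⟩]
        · rw [if_neg hq, if_neg (by simp [hq])]
          refine aLoop_eq_g cs (pos + 1) false ?_
          rw [hrun, if_neg hb]; simp
  · simp only [dif_neg h]
termination_by cs.length - pos

lemma g_none (cs : List Char) (pos : Nat)
    (h : ∀ i, pos ≤ i → (hi : i < cs.length) → cs[i] ≠ '"') :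
    findStringEndG cs pos = none := by
  rw [findStringEndG]
  by_cases hp : pos < cs.length
  · rw [dif_pos hp, if_neg (by rintro ⟨hq, -⟩; exact h pos le_rfl hp hq)]
    exact g_none cs (pos + 1) (fun i hi => h i (by omega))
  · rw [dif_neg hp]
termination_by cs.length - pos

lemma g_skip (cs : List Char) (pos t : Nat) (hpt : pos ≤ t)
    (h : ∀ i, pos ≤ i → i < t → (hi : i < cs.length) → cs[i] ≠ '"') :
    findStringEndG cs pos = findStringEndG cs t := by
  by_cases het : pos = t
  · rw [het]
  · have hlt : pos < t := by omega
    by_cases hp : pos < cs.length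
    · rw [findStringEndG, dif_pos hp, if_neg (by rintro ⟨hq, -⟩; exact h pos le_rfl hlt hp hq)]
      exact g_skip cs (pos + 1) t (by omega) (fun i hi => h i (by omega))
    · rw [g_none cs pos (fun i hi hilt => by omega),
          g_none cs t (fun i hi hilt => by omega)]
termination_by t - pos

lemma bLoop_eq_g (cs : List Char) (fuel pos : Nat) (hpos : pos ≤ cs.length)
    (hfuel : cs.length + 1 - pos ≤ fuel) :
    findStringEndBLoop cs fuel pos = findStringEndG cs pos := by
  induction fuel generalizing pos with
  | zero => omega
  | succ fuel ih =>
    rw [findStringEndBLoop]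
    simp only [PySem.Chars.findFrom_natCast cs ['"'] pos hpos]
    by_cases hf : PySem.Chars.find (cs.drop pos) ['"'] = -1
    · rw [if_pos hf, if_pos rfl]
      symm
      refine g_none cs pos (fun i hip hi hq => ?_)
      refine ((PySem.Chars.find_eq_neg_one_iff _ _).mp hf) ((List.singleton_infix_iff _ _).mpr ?_)
      have : (cs.drop pos)[i - pos]'(by simp; omega) = '"' := by
        rw [List.getElem_drop]; simpa [Nat.add_sub_cancel' hip] using hq
      exact this ▸ List.getElem_mem _
    · have hf0 : 0 ≤ PySem.Chars.find (cs.drop pos) ['"'] := by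
        have := PySem.Chars.neg_one_le_find (cs.drop pos) ['"']; omega
      obtain ⟨hpre, hmin⟩ := PySem.Chars.find_spec hf0
      set f : Int := PySem.Chars.find (cs.drop pos) ['"'] with hfdef
      have hdd : (cs.drop pos).drop f.toNat = cs.drop (pos + f.toNat) := List.drop_drop
      obtain ⟨t, ht⟩ := hpre
      have hq? : cs[pos + f.toNat]? = some '"' := by
        have h0 : (cs.drop (pos + f.toNat))[0]? = some '"' := by
          rw [← hdd, ← ht]; rfl
        simpa [List.getElem?_drop] using h0
      have hqlt : pos + f.toNat < cs.length := (List.getElem?_eq_some_iff.mp hq?).1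
      have hqe : cs[pos + f.toNat]'hqlt = '"' := by
        have := List.getElem?_eq_getElem hqlt
        rw [hq?] at this; exact (Option.some.injEq _ _).mp this.symm
      rw [if_neg hf, if_neg (by omega)]
      have htn : ((pos : Int) + f).toNat = pos + f.toNat := by omega
      have hskip : findStringEndG cs pos = findStringEndG cs (pos + f.toNat) := by
        refine g_skip cs pos (pos + f.toNat) (by omega) (fun i hip hilt hi hqi => ?_)
        refine hmin (i - pos) (by omega) ⟨cs.drop (i + 1), ?_⟩
        have : (cs.drop pos).drop (i - pos) = cs.drop i := by
          rw [List.drop_drop]; congr 1; omega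
        rw [this, List.drop_eq_getElem_cons hi, hqi]; rfl
      rw [htn]
      by_cases hpar : findStringEndBsCount cs (pos + f.toNat) % 2 = 0
      · rw [if_pos hpar, hskip, findStringEndG, dif_pos hqlt, if_pos ⟨hqe, hpar⟩]
        congr 1; omega
      · rw [if_neg hpar, hskip, findStringEndG, dif_pos hqlt, if_neg (by rintro ⟨-, h0⟩; exact hpar h0)]
        exact ih (pos + f.toNat + 1) (by omega) (by omega)

-- ===== VERDICT (by name: the statement is the Claim_ definition above) =====
theorem find_string_end_py_spec : Claim_equal_find_string_end_py := by
  intro text start_idx _ hpre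
  have h0 : 0 ≤ start_idx := hpre
  unfold Spec_find_string_end_py find_string_end_py find_string_end_py_alt
  by_cases hg : start_idx ≥ (text.toList.length : Int) ∨ PySem.List.pyGet? text.toList start_idx ≠ some '"'
  · simp only [if_pos hg]
  · rw [if_neg hg, if_neg hg]
    push_neg at hg
    obtain ⟨hlt, hq⟩ := hg
    have hsn : (start_idx + 1).toNat = start_idx.toNat + 1 := by omega
    have hqe : text.toList[start_idx.toNat]? = some '"' := by
      rw [← PySem.List.pyGet?_of_nonneg text.toList h0]; exact hq
    rw [aLoop_eq_g text.toList _ false (by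
          rw [hsn]
          simp [findStringEndBsCount, hqe]),
        bLoop_eq_g text.toList _ _ (by omega) (by omega)]
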